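-- pv_equiv track=rewrite | github.com/pjh456/GalgameCharacterSkills | main.py | _head_tail_weighted_order
-- ===== SOURCE A (Python) =====
-- def _head_tail_weighted_order(items):
--     ordered = []
--     left = 0
--     right = len(items) - 1
--     pattern = ("head", "tail", "tail")
--     step = 0
--
--     while left <= right:
--         direction = pattern[step % len(pattern)]
--         if direction == "head":
--             ordered.append(items[left])
--             left += 1
--         else:
--             ordered.append(items[right])
--             right -= 1
--         step += 1
--
--     return ordered
-- ===== SOURCE B (Python) =====
-- def _head_tail_weighted_order(items):
--     # Closed form: the element at output position s comes straight from a
--     # formula on s: heads (steps with s % 3 == 0) read position s // 3,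
--     # other steps read from the end, offset by the tail picks made so far.
--     n = len(items)
--     def src(s):
--         if s % 3 == 0:
--             return s // 3
--         return n - 1 - s + (s + 2) // 3
--     return [items[src(s)] for s in range(n)]
-- ===== Notes on version B (the rewrite author's own statement) =====
-- stated objective: alternative
-- what changed: Replaces A's stateful converging two-pointer loop with a stateless closed-form index map: output position s is items[s//3] on head steps and items[n-1-s+(s+2)//3] on tail steps, built by a comprehension with no carried pointers.
import Mathlib
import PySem

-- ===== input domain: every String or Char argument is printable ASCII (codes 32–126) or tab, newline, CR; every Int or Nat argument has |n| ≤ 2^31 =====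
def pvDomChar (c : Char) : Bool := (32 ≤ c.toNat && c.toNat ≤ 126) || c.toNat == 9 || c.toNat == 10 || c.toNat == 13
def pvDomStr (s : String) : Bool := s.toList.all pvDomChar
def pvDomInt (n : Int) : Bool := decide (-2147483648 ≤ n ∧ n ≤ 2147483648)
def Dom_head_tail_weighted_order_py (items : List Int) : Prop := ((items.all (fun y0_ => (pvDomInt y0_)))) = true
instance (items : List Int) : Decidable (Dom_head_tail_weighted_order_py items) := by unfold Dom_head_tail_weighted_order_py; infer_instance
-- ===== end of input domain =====

-- B replaces A's stateful converging two-pointer loop by a stateless closed-form index map: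
-- out[s] = items[s/3] on head steps (s % 3 == 0), else items[n-1-s+(s+2)/3] (objective: alternative).

-- ===== PORT A =====
-- A's while loop over state (left, right, step); items[left]/items[right] are always in
-- range while the loop runs, so the `.getD 0` default is never the returned value.
def aLoop (items : List Int) (left right : Int) (step : Nat) : List Int :=
  if left ≤ right then
    if step % 3 = 0 then
      (PySem.List.pyGet? items left).getD 0 :: aLoop items (left + 1) right (step + 1)
    else
      (PySem.List.pyGet? items right).getD 0 :: aLoop items left (right - 1) (step + 1)
  else []
termination_by (right + 1 - left).toNat
decreasing_by all_goals omega

def head_tail_weighted_order_py (items : List Int) : List Int :=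
  aLoop items 0 ((items.length : Int) - 1) 0

-- ===== PORT B =====
-- the closed-form source index for output position s (always in range, so `.getD 0` is never the value)
def bSrc (n s : Nat) : Int :=
  if s % 3 = 0 then ((s / 3 : Nat) : Int) else (n : Int) - 1 - s + (((s + 2) / 3 : Nat) : Int)

def head_tail_weighted_order_py_alt (items : List Int) : List Int :=
  (List.range items.length).map
    (fun s => (PySem.List.pyGet? items (bSrc items.length s)).getD 0)

-- ===== PRECONDITION & SPEC =====
def Spec_head_tail_weighted_order_py (items : List Int) (out : List Int) : Prop := out = head_tail_weighted_order_py_alt items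
instance (items : List Int) (out : List Int) : Decidable (Spec_head_tail_weighted_order_py items out) := by unfold Spec_head_tail_weighted_order_py; infer_instance

-- ===== CLAIM (what is proved, stated in full; the proofs are below) =====
def Claim_equal_head_tail_weighted_order_py : Prop := ∀ (items : List Int), Dom_head_tail_weighted_order_py items → Spec_head_tail_weighted_order_py items (head_tail_weighted_order_py items)

-- ===== LEMMAS AND PROOFS =====

/-- A's loop, started at step `s` with its invariant state
`left = (s+2)/3`, `right = n-1-s+(s+2)/3`, produces exactly B's closed-form
elements for positions `s, s+1, …, n-1`. -/
theorem loop_eq (items : List Int) : ∀ (k s : Nat), s + k = items.length →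
    aLoop items (((s + 2) / 3 : Nat) : Int)
      ((items.length : Int) - 1 - s + (((s + 2) / 3 : Nat) : Int)) s
    = (List.range' s k).map
        (fun t => (PySem.List.pyGet? items (bSrc items.length t)).getD 0) := by
  intro k
  induction k with

  | zero =>
    intro s hs
    rw [aLoop, if_neg (by omega)]
    simp
  | succ k ih =>
    intro s hs
    rw [aLoop, if_pos (by omega), List.range'_succ]
    by_cases h3 : s % 3 = 0
    · rw [if_pos h3]
      have hidx : (((s + 2) / 3 : Nat) : Int) = bSrc items.length s := by
        simp only [bSrc, if_pos h3]; congr 1; omega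
      have harg1 : (((s + 2) / 3 : Nat) : Int) + 1 = ((((s + 1) + 2) / 3 : Nat) : Int) := by
        push_cast; omega
      have harg2 : (items.length : Int) - 1 - s + (((s + 2) / 3 : Nat) : Int)
          = (items.length : Int) - 1 - ((s + 1 : Nat) : Int) + ((((s + 1) + 2) / 3 : Nat) : Int) := by
        push_cast; omega
      have hrec : aLoop items ((((s + 2) / 3 : Nat) : Int) + 1)
          ((items.length : Int) - 1 - s + (((s + 2) / 3 : Nat) : Int)) (s + 1)
          = (List.range' (s + 1) k).map
              (fun t => (PySem.List.pyGet? items (bSrc items.length t)).getD 0) := by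
        rw [harg2, harg1]
        exact ih (s + 1) (by omega)
      rw [hrec, hidx]
      simp
    · rw [if_neg h3]
      have hidx : (items.length : Int) - 1 - s + (((s + 2) / 3 : Nat) : Int)
          = bSrc items.length s := by
        simp only [bSrc, if_neg h3]
      have harg1 : (((s + 2) / 3 : Nat) : Int) = ((((s + 1) + 2) / 3 : Nat) : Int) := by
        push_cast; omega
      have harg2 : (items.length : Int) - 1 - s + (((s + 2) / 3 : Nat) : Int) - 1
          = (items.length : Int) - 1 - ((s + 1 : Nat) : Int) + ((((s + 1) + 2) / 3 : Nat) : Int) := by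
        push_cast; omega
      have hrec : aLoop items (((s + 2) / 3 : Nat) : Int)
          ((items.length : Int) - 1 - s + (((s + 2) / 3 : Nat) : Int) - 1) (s + 1)
          = (List.range' (s + 1) k).map
              (fun t => (PySem.List.pyGet? items (bSrc items.length t)).getD 0) := by
        rw [harg2, harg1]
        exact ih (s + 1) (by omega)
      rw [hrec, hidx]
      simp

-- ===== VERDICT (by name: the statement is the Claim_ definition above) =====
theorem head_tail_weighted_order_py_spec : Claim_equal_head_tail_weighted_order_py := by
  intro items _
  unfold Spec_head_tail_weighted_order_py head_tail_weighted_order_py head_tail_weighted_order_py_alt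
  have h := loop_eq items items.length 0 (by omega)
  simp only [Nat.zero_add] at h
  rw [List.range_eq_range']
  simpa using h
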